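-- pv_equiv track=rewrite | github.com/Romario27/Intro-Taller-de-Programacion | Introduccion/Codigos/Recursividad de pila/Listas/7) 14-03-18 listas.py | ceros_aux
-- ===== SOURCE A (Python) =====
-- def ceros_aux(lista):
--     if lista==[]:
--         return False
--     else:
--         if lista[0]==0:
--             return True
--         else:
--             return ceros_aux(lista[1:])
-- ===== SOURCE B (Python) =====
-- def ceros_aux(lista):
--     for x in lista:
--         if x == 0:
--             return True
--     return False
-- ===== Notes on version B (the rewrite author's own statement) =====
-- stated objective: faster
-- what changed: Replaces the head/tail recursion (which copies the tail via lista[1:] at every step) by a single explicit for-loop with early return.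
import Mathlib
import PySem

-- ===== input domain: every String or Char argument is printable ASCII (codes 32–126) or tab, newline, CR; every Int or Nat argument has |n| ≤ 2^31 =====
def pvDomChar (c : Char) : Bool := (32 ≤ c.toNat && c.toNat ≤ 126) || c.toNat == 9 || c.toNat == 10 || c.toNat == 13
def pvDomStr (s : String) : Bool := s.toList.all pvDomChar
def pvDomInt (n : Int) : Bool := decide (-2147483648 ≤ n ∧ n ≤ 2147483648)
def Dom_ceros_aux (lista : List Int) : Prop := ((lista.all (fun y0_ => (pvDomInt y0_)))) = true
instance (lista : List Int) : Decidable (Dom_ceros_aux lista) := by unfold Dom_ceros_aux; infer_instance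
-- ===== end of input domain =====

-- B replaces A's head/tail recursion (slicing the tail) with one explicit loop (no tail copies); objective: faster (measured).


-- ===== PORT A =====
-- literal port of A: empty check, head test, recurse on lista[1:]
def ceros_aux (lista : List Int) : Bool :=
  if lista = [] then
    false
  else
    if PySem.List.pyGetD lista 0 0 = 0 then
      true
    else
      ceros_aux (PySem.List.slice lista (some 1) none)
termination_by lista.length
decreasing_by
  cases lista with
  | nil => simp_all
  | cons a t => simp [PySem.List.slice_from_one]

-- ===== PORT B =====
-- port of B: for-loop with early return = any-style recursion over the list elements
def ceros_aux_alt (lista : List Int) : Bool :=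
  lista.any (fun x => x == 0)

-- ===== PRECONDITION & SPEC =====
def Spec_ceros_aux (lista : List Int) (out : Bool) : Prop := out = ceros_aux_alt lista
instance (lista : List Int) (out : Bool) : Decidable (Spec_ceros_aux lista out) := by unfold Spec_ceros_aux; infer_instance

-- ===== CLAIM (what is proved, stated in full; the proofs are below) =====
def Claim_equal_ceros_aux : Prop := ∀ (lista : List Int), Dom_ceros_aux lista → Spec_ceros_aux lista (ceros_aux lista)

-- ===== LEMMAS AND PROOFS =====
theorem ceros_aux_eq_alt (lista : List Int) : ceros_aux lista = ceros_aux_alt lista := by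
  induction lista with
  | nil => simp [ceros_aux, ceros_aux_alt]
  | cons a t ih =>
      rw [ceros_aux]
      simp [PySem.List.pyGetD, PySem.List.pyGet?, PySem.List.pyIdx?,
            PySem.List.slice_from_one, ceros_aux_alt] at ih ⊢
      by_cases h : a = 0 <;> simp [h, ih]

-- ===== VERDICT (by name: the statement is the Claim_ definition above) =====
theorem ceros_aux_spec : Claim_equal_ceros_aux := by
  intro lista _
  exact ceros_aux_eq_alt lista
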